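-- pv_equiv track=rewrite | github.com/mukesh7260/list-challenge-code | list.py | find_special_points
-- ===== SOURCE A (Python) =====
-- def find_special_points(nums):
--     if not nums:
--         return []
--
--     def is_increasing_from(index):
--         for i in range(index, len(nums) - 1):
--             if nums[i] > nums[i + 1]:
--                 return False
--         return True
--
--     def is_decreasing_from(index):
--         for i in range(index, len(nums) - 1):
--             if nums[i] < nums[i + 1]:
--                 return False
--         return True
--
--     special_points = []
--
--     for i in range(1, len(nums) - 1):
--         if (nums[i - 1] < nums[i] > nums[i + 1] and is_decreasing_from(i + 1)) or \
--            (nums[i - 1] > nums[i] < nums[i + 1] and is_increasing_from(i + 1)):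
--             special_points.append(nums[i])
--
--     return special_points
-- ===== SOURCE B (Python) =====
-- def find_special_points(nums):
--     n = len(nums)
--     if n == 0:
--         return []
--     inc = [True] * n  # inc[j]: nums[j:] is non-decreasing
--     dec = [True] * n  # dec[j]: nums[j:] is non-increasing
--     for j in range(n - 2, -1, -1):
--         inc[j] = nums[j] <= nums[j + 1] and inc[j + 1]
--         dec[j] = nums[j] >= nums[j + 1] and dec[j + 1]
--     res = []
--     for i in range(1, n - 1):
--         if nums[i - 1] < nums[i] > nums[i + 1] and dec[i + 1]:
--             res.append(nums[i])
--         elif nums[i - 1] > nums[i] < nums[i + 1] and inc[i + 1]: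
--             res.append(nums[i])
--     return res
-- ===== Notes on version B (the rewrite author's own statement) =====
-- stated objective: alternative
-- what changed: B precomputes suffix non-decreasing/non-increasing flags in one backward pass and decides each index by an O(1) flag lookup, instead of A's per-index rescan of the suffix; on random inputs A's rescans bail out early so measured times are similar.
import Mathlib
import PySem

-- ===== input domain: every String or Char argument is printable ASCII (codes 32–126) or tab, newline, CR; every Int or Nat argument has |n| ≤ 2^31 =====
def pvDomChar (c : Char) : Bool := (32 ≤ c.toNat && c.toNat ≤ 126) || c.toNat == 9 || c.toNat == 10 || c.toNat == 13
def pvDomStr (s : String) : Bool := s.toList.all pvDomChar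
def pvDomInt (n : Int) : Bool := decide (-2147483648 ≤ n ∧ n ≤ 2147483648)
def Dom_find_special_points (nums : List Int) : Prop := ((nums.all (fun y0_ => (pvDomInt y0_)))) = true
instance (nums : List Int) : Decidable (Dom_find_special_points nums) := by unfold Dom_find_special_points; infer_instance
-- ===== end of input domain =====

-- B replaces A's per-index suffix rescans by one backward pass of suffix monotonicity flags (no measured speed difference on random inputs).

-- ===== PORT A =====
-- is_increasing_from: loop over i in range(index, len-1) with early return False;
-- the fuel argument counts the remaining iterations (len-1-i), so the recursion is structural
def pvIncAux (nums : List Int) : Nat → Nat → Bool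
  | 0, _ => true
  | k + 1, i => if nums.getD i 0 > nums.getD (i + 1) 0 then false else pvIncAux nums k (i + 1)

def pvIncFrom (nums : List Int) (i : Nat) : Bool := pvIncAux nums (nums.length - 1 - i) i

def pvDecAux (nums : List Int) : Nat → Nat → Bool
  | 0, _ => true
  | k + 1, i => if nums.getD i 0 < nums.getD (i + 1) 0 then false else pvDecAux nums k (i + 1)

def pvDecFrom (nums : List Int) (i : Nat) : Bool := pvDecAux nums (nums.length - 1 - i) i

-- the main for-loop of A: i runs over range(1, len(nums)-1) (fuel = number of remaining iterations)
def pvALoop (nums : List Int) : Nat → Nat → List Int → List Int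
  | 0, _, acc => acc
  | k + 1, i, acc =>
    pvALoop nums k (i + 1)
      (if (nums.getD (i - 1) 0 < nums.getD i 0 && nums.getD i 0 > nums.getD (i + 1) 0
             && pvDecFrom nums (i + 1))
          || (nums.getD (i - 1) 0 > nums.getD i 0 && nums.getD i 0 < nums.getD (i + 1) 0
             && pvIncFrom nums (i + 1))
       then acc ++ [nums.getD i 0] else acc)

def find_special_points (nums : List Int) : List Int :=
  if nums.isEmpty then [] else pvALoop nums (nums.length - 2) 1 []

-- ===== PORT B =====
-- backward pass of Source B: pvFlags nums !getD j = (inc[j], dec[j])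
def pvFlags (nums : List Int) : List (Bool × Bool) :=
  match nums with
  | [] => []
  | [_] => [(true, true)]
  | x :: y :: rest =>
      let f := pvFlags (y :: rest)
      match f with
      | (i0, d0) :: _ => (decide (x ≤ y) && i0, decide (x ≥ y) && d0) :: f
      | [] => []

-- the second for-loop of Source B: if / elif chain over i in range(1, n-1)
def pvBLoop (nums : List Int) (flags : List (Bool × Bool)) : Nat → Nat → List Int → List Int
  | 0, _, acc => acc
  | k + 1, i, acc =>
    pvBLoop nums flags k (i + 1)
      (if nums.getD (i - 1) 0 < nums.getD i 0 && nums.getD i 0 > nums.getD (i + 1) 0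
            && (flags.getD (i + 1) (true, true)).2
       then acc ++ [nums.getD i 0]
       else if nums.getD (i - 1) 0 > nums.getD i 0 && nums.getD i 0 < nums.getD (i + 1) 0
            && (flags.getD (i + 1) (true, true)).1
       then acc ++ [nums.getD i 0]
       else acc)

def find_special_points_alt (nums : List Int) : List Int :=
  if nums.length = 0 then [] else pvBLoop nums (pvFlags nums) (nums.length - 2) 1 []

-- ===== PRECONDITION & SPEC =====
def Spec_find_special_points (nums : List Int) (out : List Int) : Prop := out = find_special_points_alt nums
instance (nums : List Int) (out : List Int) : Decidable (Spec_find_special_points nums out) := by unfold Spec_find_special_points; infer_instance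

-- ===== CLAIM (what is proved, stated in full; the proofs are below) =====
def Claim_equal_find_special_points : Prop := ∀ (nums : List Int), Dom_find_special_points nums → Spec_find_special_points nums (find_special_points nums)

-- ===== LEMMAS AND PROOFS =====

theorem pvIncAux_shift (x : Int) (l : List Int) (k j : Nat) :
    pvIncAux (x :: l) k (j + 1) = pvIncAux l k j := by
  induction k generalizing j with
  | zero => rfl
  | succ k ih => simp [pvIncAux, ih]

theorem pvDecAux_shift (x : Int) (l : List Int) (k j : Nat) :
    pvDecAux (x :: l) k (j + 1) = pvDecAux l k j := by
  induction k generalizing j with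
  | zero => rfl
  | succ k ih => simp [pvDecAux, ih]

theorem pvIncFrom_shift (x : Int) (l : List Int) (j : Nat) :
    pvIncFrom (x :: l) (j + 1) = pvIncFrom l j := by
  unfold pvIncFrom
  rw [pvIncAux_shift]
  congr 1
  simp
  omega

theorem pvDecFrom_shift (x : Int) (l : List Int) (j : Nat) :
    pvDecFrom (x :: l) (j + 1) = pvDecFrom l j := by
  unfold pvDecFrom
  rw [pvDecAux_shift]
  congr 1
  simp
  omega

theorem pvFlags_length (nums : List Int) : (pvFlags nums).length = nums.length := by
  match nums with
  | [] => rfl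
  | [_] => rfl
  | x :: y :: rest =>
    have ih := pvFlags_length (y :: rest)
    unfold pvFlags
    simp only []
    cases h : pvFlags (y :: rest) with
    | nil => simp [h] at ih
    | cons p t => simp_all

theorem pvFlags_getD (nums : List Int) (j : Nat) (hj : j < nums.length) :
    (pvFlags nums).getD j (true, true) = (pvIncFrom nums j, pvDecFrom nums j) := by
  match nums, j with
  | [x], 0 =>
    simp [pvFlags, pvIncFrom, pvDecFrom, pvIncAux, pvDecAux]
  | x :: y :: rest, 0 =>
    have ih := pvFlags_getD (y :: rest) 0 (by simp)
    unfold pvFlags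
    cases h : pvFlags (y :: rest) with
    | nil => have := pvFlags_length (y :: rest); simp [h] at this
    | cons p t =>
      simp [h] at ih
      have hI : pvIncFrom (x :: y :: rest) 0
          = (decide (x ≤ y) && pvIncFrom (y :: rest) 0) := by
        have hf : (x :: y :: rest).length - 1 - 0 = rest.length + 1 := by simp
        have hf2 : (y :: rest).length - 1 - 0 = rest.length := by simp
        rw [pvIncFrom, pvIncFrom, hf, hf2, pvIncAux]
        have hs := pvIncAux_shift x (y :: rest) rest.length 0
        by_cases hxy : x ≤ y
        · have hng : ¬ (x > y) := by omega
          simp [hng, hxy, hs]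
        · have hg : x > y := by omega
          simp [hg, hxy]
      have hD : pvDecFrom (x :: y :: rest) 0
          = (decide (x ≥ y) && pvDecFrom (y :: rest) 0) := by
        have hf : (x :: y :: rest).length - 1 - 0 = rest.length + 1 := by simp
        have hf2 : (y :: rest).length - 1 - 0 = rest.length := by simp
        rw [pvDecFrom, pvDecFrom, hf, hf2, pvDecAux]
        have hs := pvDecAux_shift x (y :: rest) rest.length 0
        by_cases hxy : y ≤ x
        · have hng : ¬ (x < y) := by omega
          simp [hng, hxy, hs]
        · have hg : x < y := by omega
          simp [hg, hxy]
      simp [hI, hD, ih]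
  | x :: y :: rest, (Nat.succ k) =>
    have hk : k < (y :: rest).length := by simpa using Nat.lt_of_succ_lt_succ hj
    have ih := pvFlags_getD (y :: rest) k hk
    unfold pvFlags
    cases h : pvFlags (y :: rest) with
    | nil => have := pvFlags_length (y :: rest); simp [h] at this
    | cons p t =>
      rw [h] at ih
      simp [pvIncFrom_shift, pvDecFrom_shift]
      simpa using ih

theorem pvIfOrSplit (a b : Bool) (v : Int) (acc : List Int) :
    (if (a || b) then acc ++ [v] else acc)
      = if a then acc ++ [v] else if b then acc ++ [v] else acc := by
  cases a <;> cases b <;> simp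

theorem pvLoop_eq (nums : List Int) (k i : Nat) (acc : List Int)
    (hki : k + i + 1 ≤ nums.length) :
    pvALoop nums k i acc = pvBLoop nums (pvFlags nums) k i acc := by
  induction k generalizing i acc with
  | zero => rfl
  | succ k ih =>
    rw [pvALoop, pvBLoop]
    have hflag := pvFlags_getD nums (i + 1) (by omega)
    rw [ih (i + 1) _ (by omega)]
    congr 1
    rw [hflag]
    exact pvIfOrSplit _ _ _ _

-- ===== VERDICT (by name: the statement is the Claim_ definition above) =====
theorem find_special_points_spec : Claim_equal_find_special_points := by
  intro nums _
  show find_special_points nums = find_special_points_alt nums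
  unfold find_special_points find_special_points_alt
  by_cases h : nums = []
  · simp [h]
  · have hne : ¬ nums.isEmpty := by simp [h]
    have hlen : nums.length ≠ 0 := by simp [h]
    simp only [hne, hlen, Bool.false_eq_true, if_false]
    by_cases h2 : 2 ≤ nums.length
    · exact pvLoop_eq nums (nums.length - 2) 1 [] (by omega)
    · have : nums.length - 2 = 0 := by omega
      rw [this]
      rfl
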